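-- pv_equiv track=rewrite | github.com/mathbeveridge/asm | aztec/build_half_coin.py | triangle_to_column
-- ===== SOURCE A (Python) =====
-- def triangle_to_column(pyr):
--     size = len(pyr)
--     out = []
--     for idx1 in range(size):
--         temp = 0
--         for idx2 in range(size-idx1):
--             temp+= pyr[idx2][idx1]
--         out.append(temp)
--     return(out)
-- ===== SOURCE B (Python) =====
-- def triangle_to_column(pyr):
--     # Bottom-up: fold the rows from last to first; 'out' holds the column sums of the
--     # suffix triangle already processed. Each new row is element-wise added to those
--     # partial sums and contributes one new trailing column.
--     out = []
--     for row in reversed(pyr):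
--         out = [row[i] + out[i] for i in range(len(out))] + [row[len(out)]]
--     return out
-- ===== Notes on version B (the rewrite author's own statement) =====
-- stated objective: alternative
-- what changed: B computes the result bottom-up in one reversed pass over the rows, maintaining the column sums of the already-processed suffix triangle: each row is element-wise added to that partial-sum list and appends one new trailing column, replacing A's per-column nested scans.
import Mathlib
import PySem

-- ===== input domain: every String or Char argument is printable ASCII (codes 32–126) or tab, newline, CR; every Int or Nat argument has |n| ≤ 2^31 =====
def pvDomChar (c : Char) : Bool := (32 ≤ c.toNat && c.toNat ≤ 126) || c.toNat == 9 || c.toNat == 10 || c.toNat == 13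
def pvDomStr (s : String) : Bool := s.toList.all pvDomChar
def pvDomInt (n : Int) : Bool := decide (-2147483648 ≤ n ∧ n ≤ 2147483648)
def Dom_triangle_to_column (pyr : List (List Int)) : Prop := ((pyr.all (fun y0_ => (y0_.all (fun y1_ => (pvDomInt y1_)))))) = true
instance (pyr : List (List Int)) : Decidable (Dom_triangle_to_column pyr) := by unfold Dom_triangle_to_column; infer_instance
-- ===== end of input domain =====

-- B is an alternative algorithm: one bottom-up pass over the rows, maintaining the column
-- sums of the suffix triangle seen so far (element-wise add, then append one new column),
-- instead of A's per-column nested scans; same O(n^2) cost.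

-- ===== PORT A =====
-- column-major: for each column idx1, sum pyr[idx2][idx1] over rows idx2 < size - idx1
def triangle_to_column (pyr : List (List Int)) : List Int :=
  (PySem.List.pyRange 0 (pyr.length : Int) 1).foldl
    (fun out idx1 =>
      out ++ [(PySem.List.pyRange 0 ((pyr.length : Int) - idx1) 1).foldl
        (fun temp idx2 =>
          temp + PySem.List.pyGetD (PySem.List.pyGetD pyr idx2 []) idx1 0) 0])
    []

-- ===== PORT B =====
-- bottom-up: fold rows last-to-first; out holds the suffix triangle's column sums;
-- each row is element-wise added to out and contributes one new trailing column
def triangle_to_column_alt (pyr : List (List Int)) : List Int :=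
  pyr.reverse.foldl
    (fun out row =>
      (PySem.List.pyRange 0 (out.length : Int) 1).map
        (fun i => PySem.List.pyGetD row i 0 + PySem.List.pyGetD out i 0)
      ++ [PySem.List.pyGetD row (out.length : Int) 0])
    []

-- ===== PRECONDITION & SPEC =====
-- Pre_ excludes exactly the ragged inputs on which A raises IndexError (row j shorter than size - j).
def Pre_triangle_to_column (pyr : List (List Int)) : Prop :=
  ∀ j, j < pyr.length → pyr.length - j ≤ (pyr.getD j []).length
instance (pyr : List (List Int)) : Decidable (Pre_triangle_to_column pyr) := by
  unfold Pre_triangle_to_column; infer_instance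

def pvWitness_triangle_to_column : List (List Int) := [[1, 2, 3], [4, 5], [6]]

def Spec_triangle_to_column (pyr : List (List Int)) (out : List Int) : Prop := out = triangle_to_column_alt pyr
instance (pyr : List (List Int)) (out : List Int) : Decidable (Spec_triangle_to_column pyr out) := by unfold Spec_triangle_to_column; infer_instance

-- ===== CLAIM (what is proved, stated in full; the proofs are below) =====
def Claim_equal_triangle_to_column : Prop := ∀ (pyr : List (List Int)), Dom_triangle_to_column pyr → Pre_triangle_to_column pyr → Spec_triangle_to_column pyr (triangle_to_column pyr)

-- ===== LEMMAS AND PROOFS =====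

-- entry pyr[j][i], Nat-indexed and totalized with default 0
def pvG (pyr : List (List Int)) (j i : Nat) : Int := (pyr.getD j []).getD i 0

-- the common value: the list of column sums of the triangle
def pvS (pyr : List (List Int)) : List Int :=
  (List.range pyr.length).map
    (fun i => ((List.range (pyr.length - i)).map (fun k => pvG pyr k i)).sum)

lemma pv_getD_map_range (f : Nat → Int) (n i : Nat) (h : i < n) :
    ((List.range n).map f).getD i 0 = f i := by
  rw [List.getD_eq_getElem?_getD, List.getElem?_map, List.getElem?_range h]
  rfl

-- A in Nat form
lemma pv_A_eq (pyr : List (List Int)) : triangle_to_column pyr = pvS pyr := by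
  unfold triangle_to_column pvS
  rw [PySem.List.pyRange_zero_nat, List.foldl_map, PySem.List.foldl_append_singleton_eq_map,
    List.nil_append]
  apply List.map_congr_left
  intro k hk
  have hk' : k < pyr.length := List.mem_range.mp hk
  have hc : ((pyr.length : Int) - (k : Int)) = ((pyr.length - k : Nat) : Int) := by omega
  rw [hc, PySem.List.pyRange_zero_nat, List.foldl_map, PySem.List.foldl_add]
  simp [pvG, PySem.List.pyGetD_natCast]

-- one bottom-up step of B, in Nat form
def pvStep (out row : List Int) : List Int :=
  (List.range out.length).map (fun i => row.getD i 0 + out.getD i 0) ++ [row.getD out.length 0]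

lemma pv_step_eq (out row : List Int) :
    (PySem.List.pyRange 0 (out.length : Int) 1).map
        (fun i => PySem.List.pyGetD row i 0 + PySem.List.pyGetD out i 0)
      ++ [PySem.List.pyGetD row (out.length : Int) 0] = pvStep out row := by
  unfold pvStep
  rw [PySem.List.pyRange_zero_nat, List.map_map]
  simp [PySem.List.pyGetD_natCast]

lemma pvS_length (pyr : List (List Int)) : (pvS pyr).length = pyr.length := by
  simp [pvS]

-- the column sums satisfy B's bottom-up recurrence
lemma pvS_cons (r : List Int) (rest : List (List Int)) :
    pvS (r :: rest) = pvStep (pvS rest) r := by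
  unfold pvStep
  rw [pvS_length]
  have hlen : (r :: rest).length = rest.length + 1 := rfl
  unfold pvS
  rw [hlen, List.range_succ, List.map_append, List.map_singleton]
  congr 1
  · apply List.map_congr_left
    intro i hi
    have hi' : i < rest.length := List.mem_range.mp hi
    have h1 : rest.length + 1 - i = (rest.length - i) + 1 := by omega
    rw [h1, List.range_succ_eq_map, List.map_cons, List.map_map, List.sum_cons]
    have h0 : pvG (r :: rest) 0 i = r.getD i 0 := rfl
    rw [h0]
    congr 1
    · rw [pv_getD_map_range _ _ _ hi']
      apply congrArg
      apply List.map_congr_left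
      intro k _
      rfl
  · have h2 : rest.length + 1 - rest.length = 1 := by omega
    rw [h2]
    simp [pvG]

-- B in Nat form
lemma pv_B_eq (pyr : List (List Int)) : triangle_to_column_alt pyr = pvS pyr := by
  unfold triangle_to_column_alt
  rw [List.foldl_reverse]
  induction pyr with
  | nil => rfl
  | cons r rest ih =>
    rw [List.foldr_cons, ih, pv_step_eq, pvS_cons]

-- ===== VERDICT (by name: the statement is the Claim_ definition above) =====
theorem triangle_to_column_spec : Claim_equal_triangle_to_column := by
  intro pyr _ _
  unfold Spec_triangle_to_column
  rw [pv_A_eq, pv_B_eq]
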